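-- pv_equiv track=rewrite | github.com/t0r1n88/Lachesis | mental_state/gilemhanova_ickbsh.py | calc_value_spd
-- ===== SOURCE A (Python) =====
-- def calc_value_spd(row):
--     """
--     Функция для подсчета значения
--     :return: число
--     """
--     lst_pr = [15,25,
--               5,10,20,30]
--     lst_neg = [5,10,20,30]
--     value_forward = 0  # результат
--     for idx, value in enumerate(row,1):
--         if idx in lst_pr:
--             if idx not in lst_neg:
--                 value_forward += value
--             else:
--                 if value == 1:
--                     value_forward += 4
--                 elif value == 2:
--                     value_forward += 3
--                 elif value == 3:
--                     value_forward += 2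
--                 else:
--                     value_forward += 1
--
--
--     return value_forward
-- ===== SOURCE B (Python) =====
-- def _rev(v):
--     if v == 1:
--         return 4
--     elif v == 2:
--         return 3
--     elif v == 3:
--         return 2
--     else:
--         return 1
--
--
-- def calc_value_spd(row):
--     row = list(row)
--     n = len(row)
--     total = 0
--     if n >= 15:
--         total += row[14]
--     if n >= 25:
--         total += row[24]
--     if n >= 5:
--         total += _rev(row[4])
--     if n >= 10:
--         total += _rev(row[9])
--     if n >= 20:
--         total += _rev(row[19])
--     if n >= 30:
--         total += _rev(row[29])
--     return total
-- ===== Notes on version B (the rewrite author's own statement) =====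
-- stated objective: faster
-- what changed: Replaces A's whole-row enumerate scan with six direct, length-guarded positional accesses (positions 15 and 25 added raw, positions 5/10/20/30 through the reversed-score chain), so no loop over the row at all.
import Mathlib
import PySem

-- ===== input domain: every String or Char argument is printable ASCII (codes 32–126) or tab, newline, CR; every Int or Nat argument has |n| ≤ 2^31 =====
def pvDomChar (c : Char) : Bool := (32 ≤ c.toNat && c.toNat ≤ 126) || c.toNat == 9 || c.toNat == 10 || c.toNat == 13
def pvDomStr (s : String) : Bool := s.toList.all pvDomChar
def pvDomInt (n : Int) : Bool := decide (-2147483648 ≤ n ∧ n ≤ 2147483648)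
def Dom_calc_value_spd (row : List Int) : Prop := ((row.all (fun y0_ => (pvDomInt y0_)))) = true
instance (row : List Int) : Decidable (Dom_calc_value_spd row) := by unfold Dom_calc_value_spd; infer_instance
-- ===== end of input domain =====

-- B replaces A's whole-row enumerate scan by six length-guarded direct positional accesses (objective: faster by a constant factor).

-- ===== PORT A =====
def calc_value_spd (row : List Int) : Int :=
  let lst_pr : List Int := [15, 25, 5, 10, 20, 30]
  let lst_neg : List Int := [5, 10, 20, 30]
  (PySem.List.enumerate row 1).foldl
    (fun value_forward p =>
      let idx := p.1
      let value := p.2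
      if idx ∈ lst_pr then
        if idx ∉ lst_neg then value_forward + value
        else
          if value = 1 then value_forward + 4
          else if value = 2 then value_forward + 3
          else if value = 3 then value_forward + 2
          else value_forward + 1
      else value_forward) 0

-- ===== PORT B =====
-- helper _rev of Source B
def revScore (v : Int) : Int :=
  if v = 1 then 4 else if v = 2 then 3 else if v = 3 then 2 else 1

def calc_value_spd_alt (row : List Int) : Int :=
  let n := row.length
  let t0 : Int := 0
  let t1 := if 15 ≤ n then t0 + row.getD 14 0 else t0
  let t2 := if 25 ≤ n then t1 + row.getD 24 0 else t1
  let t3 := if 5 ≤ n then t2 + revScore (row.getD 4 0) else t2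
  let t4 := if 10 ≤ n then t3 + revScore (row.getD 9 0) else t3
  let t5 := if 20 ≤ n then t4 + revScore (row.getD 19 0) else t4
  if 30 ≤ n then t5 + revScore (row.getD 29 0) else t5

-- ===== PRECONDITION & SPEC =====
def Spec_calc_value_spd (row : List Int) (out : Int) : Prop := out = calc_value_spd_alt row
instance (row : List Int) (out : Int) : Decidable (Spec_calc_value_spd row out) := by unfold Spec_calc_value_spd; infer_instance

-- ===== CLAIM (what is proved, stated in full; the proofs are below) =====
def Claim_equal_calc_value_spd : Prop := ∀ (row : List Int), Dom_calc_value_spd row → Spec_calc_value_spd row (calc_value_spd row)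

-- ===== LEMMAS AND PROOFS =====

-- A's if/elif scoring chain is acc + revScore v
theorem chain_eq (acc v : Int) :
    (if v = 1 then acc + 4 else if v = 2 then acc + 3 else if v = 3 then acc + 2 else acc + 1)
      = acc + revScore v := by
  unfold revScore; split_ifs <;> ring

-- A's loop body in the normal form norm_num leaves it in
def stepN : Int → Int × Int → Int := fun value_forward p =>
  if p.1 = 15 ∨ p.1 = 25 ∨ p.1 = 5 ∨ p.1 = 10 ∨ p.1 = 20 ∨ p.1 = 30 then
    if ¬p.1 = 5 ∧ ¬p.1 = 10 ∧ ¬p.1 = 20 ∧ ¬p.1 = 30 then value_forward + p.2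
    else value_forward + revScore p.2
  else value_forward

theorem tailz_aux (t : List Int) : ∀ (s acc : Int), 31 ≤ s →
    (PySem.List.enumerate t s).foldl stepN acc = acc := by
  induction t with
  | nil => intro s acc _; simp [PySem.List.enumerate_nil]
  | cons x xs ih =>
    intro s acc hs
    rw [PySem.List.enumerate_cons, List.foldl_cons]
    have hstep : stepN acc (s, x) = acc := by
      unfold stepN; simp only; rw [if_neg (by omega)]
    rw [hstep]
    exact ih (s + 1) acc (by omega)

-- past position 30 A's loop adds nothing
theorem tailz (t : List Int) (acc : Int) :
    List.foldl
      (fun value_forward p =>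
        if p.1 = 15 ∨ p.1 = 25 ∨ p.1 = 5 ∨ p.1 = 10 ∨ p.1 = 20 ∨ p.1 = 30 then
          if ¬p.1 = 5 ∧ ¬p.1 = 10 ∧ ¬p.1 = 20 ∧ ¬p.1 = 30 then value_forward + p.2
          else value_forward + revScore p.2
        else value_forward)
      acc (PySem.List.enumerate t 31) = acc :=
  tailz_aux t 31 acc (by norm_num)

-- ===== VERDICT (by name: the statement is the Claim_ definition above) =====
theorem calc_value_spd_spec : Claim_equal_calc_value_spd := by
  intro row _
  unfold Spec_calc_value_spd calc_value_spd calc_value_spd_alt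
  rcases row with _ | ⟨a1, _ | ⟨a2, _ | ⟨a3, _ | ⟨a4, _ | ⟨a5, _ | ⟨a6, _ | ⟨a7, _ | ⟨a8, _ | ⟨a9,
    _ | ⟨a10, _ | ⟨a11, _ | ⟨a12, _ | ⟨a13, _ | ⟨a14, _ | ⟨a15, _ | ⟨a16, _ | ⟨a17, _ | ⟨a18,
    _ | ⟨a19, _ | ⟨a20, _ | ⟨a21, _ | ⟨a22, _ | ⟨a23, _ | ⟨a24, _ | ⟨a25, _ | ⟨a26, _ | ⟨a27,
    _ | ⟨a28, _ | ⟨a29, _ | ⟨a30, t⟩⟩⟩⟩⟩⟩⟩⟩⟩⟩⟩⟩⟩⟩⟩⟩⟩⟩⟩⟩⟩⟩⟩⟩⟩⟩⟩⟩⟩⟩ <;>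
    norm_num [PySem.List.enumerate_cons, PySem.List.enumerate_nil, chain_eq, List.getD, tailz] <;>
    try ring
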